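-- pv_equiv track=rewrite | github.com/ijnim1121/programmers | 프로그래머스/0/120896. 한 번만 등장한 문자/한 번만 등장한 문자.py | solution
-- ===== SOURCE A (Python) =====
-- def solution(s):
--     # 문자열 s에서 각 문자의 빈도수를 계산
--     char_count = {} #딕셔너리
--     for char in s:
--         if char in char_count:
--             char_count[char] += 1
--         else:
--             char_count[char] = 1
--
--     # 한 번만 등장하는 문자를 사전 순으로 정렬하여 문자열로 만들기
--     result = ''.join(sorted(char for char, count in char_count.items() if count == 1))
--     return result
-- ===== SOURCE B (Python) =====
-- def solution(s):
--     # Sort the characters first; then a single streaming pass over the sorted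
--     # string keeps exactly the characters whose run has length 1 (no counting
--     # table at all). Output is already in sorted order.
--     res = []
--     prev = None
--     unique = False
--     for c in sorted(s):
--         if c != prev:
--             if unique:
--                 res.append(prev)
--             prev = c
--             unique = True
--         else:
--             unique = False
--     if unique:
--         res.append(prev)
--     return ''.join(res)
-- ===== Notes on version B (the rewrite author's own statement) =====
-- stated objective: alternative
-- what changed: B builds no frequency table: it sorts the characters and makes one streaming pass over the sorted string with a (prev, unique) accumulator, emitting a character exactly when its run of equal adjacent characters has length 1; the sorted output falls out of the traversal order instead of a final sort of dict keys.
import Mathlib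
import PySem

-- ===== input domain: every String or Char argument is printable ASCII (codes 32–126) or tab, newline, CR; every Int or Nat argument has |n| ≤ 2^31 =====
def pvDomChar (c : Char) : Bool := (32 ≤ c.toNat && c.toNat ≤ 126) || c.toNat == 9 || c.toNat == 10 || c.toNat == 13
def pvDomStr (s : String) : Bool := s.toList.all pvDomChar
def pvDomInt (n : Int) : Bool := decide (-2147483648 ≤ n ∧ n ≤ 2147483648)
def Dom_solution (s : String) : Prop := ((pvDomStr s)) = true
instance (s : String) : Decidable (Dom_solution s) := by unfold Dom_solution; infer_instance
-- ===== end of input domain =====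

-- B replaces A's frequency-dictionary + final sort by sort-first, then ONE streaming pass
-- over the sorted characters keeping runs of length 1 (an "alternative" algorithm, no speed claim).


-- ===== PORT A =====
-- 'for char in s: if char in char_count: char_count[char] += 1 else: char_count[char] = 1'
-- then sorted chars of the items whose count is 1, joined.
def solution (s : String) : String :=
  let char_count : PySem.Dict Char Int :=
    s.toList.foldl
      (fun d c => if d.contains c then d.insert c (d.getD c 0 + 1) else d.insert c 1)
      PySem.Dict.empty
  String.ofList
    (PySem.List.sorted
      ((char_count.items.filter (fun p => p.2 == 1)).map Prod.fst)
      (fun x => x) false)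

-- ===== PORT B =====
-- one loop step of Source B: 'if c != prev: (if unique: res.append(prev)); prev, unique = c, True
--                         else: unique = False'
-- prev is Python's None-or-char; when unique is true prev is always set (some _),
-- so the .getD 'a' default is never the value appended.
def solutionAltStep (st : List Char × Option Char × Bool) (c : Char) :
    List Char × Option Char × Bool :=
  if some c ≠ st.2.1 then
    ((if st.2.2 then st.1 ++ [st.2.1.getD 'a'] else st.1), some c, true)
  else (st.1, st.2.1, false)

-- ''.join(res) after the trailing 'if unique: res.append(prev)'
def solutionAltFinish (st : List Char × Option Char × Bool) : List Char :=
  if st.2.2 then st.1 ++ [st.2.1.getD 'a'] else st.1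

def solution_alt (s : String) : String :=
  String.ofList
    (solutionAltFinish
      ((PySem.List.sorted s.toList (fun x => x) false).foldl solutionAltStep ([], none, false)))

-- ===== PRECONDITION & SPEC =====
def Spec_solution (s : String) (out : String) : Prop := out = solution_alt s
instance (s : String) (out : String) : Decidable (Spec_solution s out) := by unfold Spec_solution; infer_instance

-- ===== CLAIM (what is proved, stated in full; the proofs are below) =====
def Claim_equal_solution : Prop := ∀ (s : String), Dom_solution s → Spec_solution s (solution s)

-- ===== LEMMAS AND PROOFS =====

-- A's counting loop builds exactly collections.Counter(s)
theorem loop_eq_counter (l : List Char) :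
    l.foldl
      (fun d c => if d.contains c then d.insert c (d.getD c 0 + 1) else d.insert c 1)
      PySem.Dict.empty = PySem.Dict.counter l := by
  rw [← PySem.Dict.foldl_insert_getD_add_one_eq_counter]
  apply PySem.List.foldl_congr_mem
  intro d c _
  by_cases h : d.contains c = true
  · simp [h]
  · have hc : d.contains c = false := by simpa using h
    have hn : d.get? c = none := (PySem.Dict.get?_eq_none_iff_contains d c).mpr hc
    have hz : d.getD c 0 = 0 := by simp [PySem.Dict.getD, hn]
    simp [h, hz]

-- core invariant of B's streaming pass: on a sorted suffix t, with current run char p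
-- below every element of t, the fold finishes to: res, then p if its run ended with
-- length 1 (uniq and p not in t), then the chars of t whose total count in t is 1.
theorem fold_some (n : Nat) :
    ∀ (t : List Char), t.length ≤ n → t.Pairwise (· ≤ ·) →
    ∀ (res : List Char) (p : Char) (uniq : Bool), (∀ c ∈ t, p ≤ c) →
    solutionAltFinish (t.foldl solutionAltStep (res, some p, uniq)) =
      (if uniq ∧ p ∉ t then res ++ [p] else res) ++
        t.filter (fun c => c ≠ p && t.count c == 1) := by
  induction n with
  | zero =>
      intro t ht _ res p uniq _
      have : t = [] := List.eq_nil_of_length_eq_zero (Nat.le_zero.mp ht)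
      subst this
      cases uniq <;> simp [solutionAltFinish]
  | succ n ih =>
      intro t ht hs res p uniq hle
      cases t with
      | nil => cases uniq <;> simp [solutionAltFinish]
      | cons c t' =>
          have hs' : t'.Pairwise (· ≤ ·) := hs.tail
          have hct' : ∀ x ∈ t', c ≤ x := fun x hx => (List.pairwise_cons.mp hs).1 x hx
          by_cases hcp : c = p
          · subst hcp
            have hstep : solutionAltStep (res, some c, uniq) c = (res, some c, false) := by
              simp [solutionAltStep]
            rw [List.foldl_cons, hstep,
              ih t' (by simpa using Nat.le_of_succ_le_succ ht) hs' res c false hct']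
            have hmem : c ∈ c :: t' := List.mem_cons_self ..
            rw [if_neg (by simp), if_neg (by simp [hmem])]
            rw [List.filter_cons]
            simp only [show ((c ≠ c) && ((c :: t').count c == 1)) = false by simp]
            congr 1
            apply List.filter_congr
            intro x hx
            by_cases hxc : x = c
            · simp [hxc]
            · have : (c :: t').count x = t'.count x := by
                simp [Ne.symm hxc]
              simp [this]
          · have hpc : p < c := lt_of_le_of_ne (hle c (List.mem_cons_self ..)) (Ne.symm hcp)
            have hpnot : p ∉ c :: t' := by
              intro hmem
              rcases List.mem_cons.mp hmem with h | h
              · exact hcp h.symm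
              · exact absurd (hct' p h) (not_le.mpr hpc)
            have hstep : solutionAltStep (res, some p, uniq) c =
                ((if uniq then res ++ [p] else res), some c, true) := by
              simp [solutionAltStep, hcp]
            rw [List.foldl_cons, hstep,
              ih t' (by simpa using Nat.le_of_succ_le_succ ht) hs'
                (if uniq then res ++ [p] else res) c true hct']
            have h1 : (if uniq ∧ p ∉ c :: t' then res ++ [p] else res) =
                (if uniq then res ++ [p] else res) := by
              cases uniq <;> simp [hpnot]
            rw [h1]
            have h2 : List.filter (fun x => x ≠ p && (c :: t').count x == 1) (c :: t') =
                (if c ∉ t' then [c] else []) ++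
                  List.filter (fun x => x ≠ c && t'.count x == 1) t' := by
              rw [List.filter_cons]
              have hcnt : (c :: t').count c = t'.count c + 1 := by simp
              by_cases hct : c ∈ t'
              · have hc0 : t'.count c ≠ 0 := by simpa [List.count_eq_zero] using hct
                have hne1 : ((c :: t').count c == 1) = false := by
                  rw [beq_eq_false_iff_ne]; omega
                rw [if_neg (by simp; omega), if_neg (not_not_intro hct)]
                simp only [List.nil_append]
                apply List.filter_congr
                intro x hx
                by_cases hxc : x = c
                · subst hxc
                  simp
                  omega
                · have hxp : x ≠ p := by
                    intro h; subst h
                    exact absurd (hct' x hx) (not_le.mpr hpc)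
                  have : (c :: t').count x = t'.count x := by
                    simp [Ne.symm hxc]
                  simp [this, hxp, hxc]
              · have hc0 : t'.count c = 0 := List.count_eq_zero.mpr hct
                have heq1 : ((c :: t').count c == 1) = true := by
                  rw [beq_iff_eq]; omega
                rw [if_pos (by simp [hcp, hc0]), if_pos hct]
                simp only [List.singleton_append, List.cons.injEq, true_and]
                apply List.filter_congr
                intro x hx
                by_cases hxc : x = c
                · subst hxc; exact absurd hx hct
                · have hxp : x ≠ p := by
                    intro h; subst h
                    exact absurd (hct' x hx) (not_le.mpr hpc)
                  have : (c :: t').count x = t'.count x := by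
                    simp [Ne.symm hxc]
                  simp [this, hxp, hxc]
            rw [h2]
            have h3 : (if (true : Bool) = true ∧ c ∉ t' then
                  (if uniq then res ++ [p] else res) ++ [c]
                else (if uniq then res ++ [p] else res)) =
                (if uniq then res ++ [p] else res) ++ (if c ∉ t' then [c] else []) := by
              by_cases hct : c ∈ t' <;> simp [hct]
            rw [h3, List.append_assoc]

-- B's whole pass on a sorted list t computes the length-1-run chars of t, in place
theorem fold_spec (t : List Char) (hs : t.Pairwise (· ≤ ·)) :
    solutionAltFinish (t.foldl solutionAltStep ([], none, false)) =
      t.filter (fun c => t.count c == 1) := by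
  cases t with
  | nil => simp [solutionAltFinish]
  | cons c t' =>
      have hs' : t'.Pairwise (· ≤ ·) := hs.tail
      have hct' : ∀ x ∈ t', c ≤ x := fun x hx => (List.pairwise_cons.mp hs).1 x hx
      have hstep : solutionAltStep ([], none, false) c = ([], some c, true) := by
        simp [solutionAltStep]
      rw [List.foldl_cons, hstep,
        fold_some t'.length t' le_rfl hs' [] c true hct']
      rw [List.filter_cons]
      have hcnt : (c :: t').count c = t'.count c + 1 := by simp
      by_cases hct : c ∈ t'
      · have hc0 : t'.count c ≠ 0 := by simpa [List.count_eq_zero] using hct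
        have hne : (((c :: t').count c == 1)) = false := by
          rw [beq_eq_false_iff_ne]; omega
        rw [if_neg (show ¬((true:Bool) = true ∧ c ∉ t') by simp [hct])]
        rw [if_neg (show ¬(((c :: t').count c == 1) = true) by simp; omega)]
        simp only [List.nil_append]
        apply List.filter_congr
        intro x hx
        by_cases hxc : x = c
        · subst hxc; simp; omega
        · have : (c :: t').count x = t'.count x := by
            simp [Ne.symm hxc]
          simp [this, hxc]
      · have hc0 : t'.count c = 0 := List.count_eq_zero.mpr hct
        have heq : (((c :: t').count c == 1)) = true := by
          rw [beq_iff_eq]; omega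
        rw [if_pos (show (true:Bool) = true ∧ c ∉ t' from ⟨rfl, hct⟩), if_pos heq]
        simp only [List.nil_append, List.singleton_append, List.cons.injEq, true_and]
        apply List.filter_congr
        intro x hx
        by_cases hxc : x = c
        · subst hxc; exact absurd hx hct
        · have : (c :: t').count x = t'.count x := by
            simp [Ne.symm hxc]
          simp [this, hxc]

-- ===== VERDICT (by name: the statement is the Claim_ definition above) =====
theorem solution_spec : Claim_equal_solution := by
  intro s _
  unfold Spec_solution
  simp only [solution, solution_alt]
  rw [loop_eq_counter, PySem.Dict.items_counter]
  rw [List.filter_map, List.map_map]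
  have hid : (Prod.fst ∘ fun k : Char => (k, (s.toList.count k : Int))) = id := rfl
  rw [hid, List.map_id]
  -- name the two character lists
  have hsp : (PySem.List.sorted s.toList (fun x => x) false).Pairwise (· ≤ ·) := by
    have := PySem.List.sorted_pairwise (xs := s.toList) (key := fun x : Char => x)
    simpa using this
  rw [fold_spec _ hsp]
  -- the Int-valued counter predicate is the Nat count predicate
  have hfp : List.filter ((fun p : Char × Int => p.2 == 1) ∘ fun k : Char => (k, (s.toList.count k : Int)))
      (PySem.Set.ofList s.toList)
      = List.filter (fun c => s.toList.count c == 1) (PySem.Set.ofList s.toList) := by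
    apply List.filter_congr
    intro c _
    simp [Function.comp]
  rw [hfp]
  -- the run-filter of the sorted list is a sorted, duplicate-free arrangement of the
  -- filtered distinct-character set, hence equal to its sort
  apply congrArg
  have hperm : (PySem.List.sorted s.toList (fun x => x) false).Perm s.toList :=
    PySem.List.sorted_perm ..
  have hnd1 : ((PySem.List.sorted s.toList (fun x => x) false).filter
      (fun c => (PySem.List.sorted s.toList (fun x => x) false).count c == 1)).Nodup := by
    rw [List.nodup_iff_count_le_one]
    intro a
    by_cases ha : a ∈ (PySem.List.sorted s.toList (fun x => x) false).filter
        (fun c => (PySem.List.sorted s.toList (fun x => x) false).count c == 1)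
    · have h1 : (PySem.List.sorted s.toList (fun x => x) false).count a = 1 := by
        have := (List.mem_filter.mp ha).2
        simpa using this
      calc _ ≤ (PySem.List.sorted s.toList (fun x => x) false).count a :=
            List.filter_sublist.count_le a
        _ = 1 := h1
    · simp [List.count_eq_zero.mpr ha]
  have hnd2 : (List.filter (fun c => s.toList.count c == 1) (PySem.Set.ofList s.toList)).Nodup :=
    (PySem.Set.nodup_ofList _).filter _
  have hp2 : ((PySem.List.sorted s.toList (fun x => x) false).filter
      (fun c => (PySem.List.sorted s.toList (fun x => x) false).count c == 1)).Perm
      (List.filter (fun c => s.toList.count c == 1) (PySem.Set.ofList s.toList)) := by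
    rw [List.perm_ext_iff_of_nodup hnd1 hnd2]
    intro a
    simp only [List.mem_filter, PySem.Set.mem_ofList, hperm.mem_iff, hperm.count_eq]
  have hpw : ((PySem.List.sorted s.toList (fun x => x) false).filter
      (fun c => (PySem.List.sorted s.toList (fun x => x) false).count c == 1)).Pairwise
      (· ≤ ·) :=
    List.Pairwise.sublist List.filter_sublist hsp
  exact PySem.List.sorted_id_eq_of_perm_of_pairwise _ _ hp2 hpw
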